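-- pv_equiv track=rewrite | github.com/Eternalyze0/mtg_bot | mtg_bot.py | format_scryfall_deck
-- ===== SOURCE A (Python) =====
-- def format_scryfall_deck(scryfall_deck):
-- 	forge_deck = {}
-- 	for scryfall_card in scryfall_deck:
-- 		forge_card = scryfall_card['name']
-- 		# if scryfall_card['name'] in basic_land_names:
-- 		# 	forge_card += '|1'
-- 		if forge_card in forge_deck:
-- 			forge_deck[forge_card] += 1
-- 		else:
-- 			forge_deck[forge_card] = 1
-- 	# forge_deck_string = '[metadata]' + '\nName=' + name + '\n[Main]\n'
-- 	forge_deck_string = 'Deck\n'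
-- 	for card, count in sorted(forge_deck.items(), key=lambda x: x[0]):
-- 		forge_deck_string += str(count) + ' ' + card + '\n'
-- 	return forge_deck_string
-- ===== SOURCE B (Python) =====
-- def format_scryfall_deck(scryfall_deck):
--     # sort all names, then run-length group consecutive equal names
--     names = sorted(card['name'] for card in scryfall_deck)
--     out = 'Deck\n'
--     if not names:
--         return out
--     cur = names[0]
--     cnt = 1
--     for name in names[1:]:
--         if name == cur:
--             cnt += 1
--         else:
--             out += str(cnt) + ' ' + cur + '\n'
--             cur = name
--             cnt = 1
--     out += str(cnt) + ' ' + cur + '\n'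
--     return out
-- ===== Notes on version B (the rewrite author's own statement) =====
-- stated objective: alternative
-- what changed: Replaces the dict-counter-then-sort-keys structure with sorting the full list of names and run-length grouping consecutive equal names in one pass.
import Mathlib
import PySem

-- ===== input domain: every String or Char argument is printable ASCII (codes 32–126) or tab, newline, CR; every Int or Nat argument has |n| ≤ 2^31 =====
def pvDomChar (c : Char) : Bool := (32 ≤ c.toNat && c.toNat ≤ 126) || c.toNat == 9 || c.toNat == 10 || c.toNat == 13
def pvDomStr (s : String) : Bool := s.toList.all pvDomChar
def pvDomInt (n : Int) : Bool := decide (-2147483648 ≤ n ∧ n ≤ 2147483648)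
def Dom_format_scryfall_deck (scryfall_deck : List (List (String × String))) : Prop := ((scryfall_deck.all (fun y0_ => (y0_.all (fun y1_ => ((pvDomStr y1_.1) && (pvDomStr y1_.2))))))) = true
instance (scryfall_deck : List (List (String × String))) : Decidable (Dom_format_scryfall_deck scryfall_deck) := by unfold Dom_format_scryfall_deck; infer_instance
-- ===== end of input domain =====

-- B replaces A's count-into-dict-then-sort-keys with sort-all-names-then-run-length-group (alternative decomposition, same cost).

-- ===== PORT A =====
-- scryfall_card['name']: the KeyError case (get? = none) is excluded by Pre_; the .getD "" default is only reached outside Pre_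
def pvCardName (card : List (String × String)) : String :=
  ((PySem.Dict.mk card).get? "name").getD ""

def format_scryfall_deck (scryfall_deck : List (List (String × String))) : String :=
  let forge_deck : PySem.Dict String Int :=
    scryfall_deck.foldl (fun d scryfall_card =>
      let forge_card := pvCardName scryfall_card
      if d.contains forge_card then d.insert forge_card (d.getD forge_card 0 + 1)
      else d.insert forge_card 1) PySem.Dict.empty
  (PySem.List.sorted forge_deck.items (fun x => x.1) false).foldl
    (fun s p => s ++ PySem.Int.toStr p.2 ++ " " ++ p.1 ++ "\n") "Deck\n"

-- ===== PORT B =====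
def pvLine (card : String) (count : Int) : String :=
  PySem.Int.toStr count ++ " " ++ card ++ "\n"

-- flush the final (out, cur, cnt) loop state: the trailing "out += str(cnt) + ' ' + cur + '\n'"
def pvFinish (s : String × String × Int) : String :=
  s.1 ++ pvLine s.2.1 s.2.2

def format_scryfall_deck_alt (scryfall_deck : List (List (String × String))) : String :=
  match PySem.List.sorted (scryfall_deck.map pvCardName) (fun x => x) false with
  | [] => "Deck\n"
  | c0 :: rest =>
    pvFinish (rest.foldl (fun (s : String × String × Int) name =>
      if name = s.2.1 then (s.1, s.2.1, s.2.2 + 1)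
      else (s.1 ++ pvLine s.2.1 s.2.2, name, 1)) ("Deck\n", c0, 1))

-- ===== PRECONDITION & SPEC =====
-- Pre_ excludes exactly the decks containing a card without a 'name' key, on which the Python raises KeyError.
def Pre_format_scryfall_deck (scryfall_deck : List (List (String × String))) : Prop :=
  (scryfall_deck.all (fun card => (PySem.Dict.mk card).contains "name")) = true
instance (scryfall_deck : List (List (String × String))) : Decidable (Pre_format_scryfall_deck scryfall_deck) := by unfold Pre_format_scryfall_deck; infer_instance
def pvWitness_format_scryfall_deck : (List (List (String × String))) :=
  ([[("name", "Island")], [("name", "Lightning Bolt"), ("cmc", "1")], [("name", "Island")]])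

def Spec_format_scryfall_deck (scryfall_deck : List (List (String × String))) (out : String) : Prop := out = format_scryfall_deck_alt scryfall_deck
instance (scryfall_deck : List (List (String × String))) (out : String) : Decidable (Spec_format_scryfall_deck scryfall_deck out) := by unfold Spec_format_scryfall_deck; infer_instance

-- ===== CLAIM (what is proved, stated in full; the proofs are below) =====
def Claim_equal_format_scryfall_deck : Prop := ∀ (scryfall_deck : List (List (String × String))), Dom_format_scryfall_deck scryfall_deck → Pre_format_scryfall_deck scryfall_deck → Spec_format_scryfall_deck scryfall_deck (format_scryfall_deck scryfall_deck)

-- ===== LEMMAS AND PROOFS =====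

-- canonical run-length grouping of a (sorted) list: (first element, run count) per run
def pvGroups : List String → List (String × Int)
  | [] => []
  | x :: t => (x, 1 + (t.count x : Int)) :: pvGroups (t.dropWhile (· == x))
termination_by m => m.length
decreasing_by
  simpa using Nat.lt_succ_of_le (t.length_dropWhile_le (· == x))

-- concatenation of the formatted lines
def pvCat : List (String × Int) → String
  | [] => ""
  | p :: t => pvLine p.1 p.2 ++ pvCat t

theorem pvGroups_fst_mem : ∀ (m : List String), ∀ p ∈ pvGroups m, p.1 ∈ m := by
  intro m
  induction m using pvGroups.induct with
  | case1 => intro p hp; simp [pvGroups] at hp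
  | case2 x t ih =>
    intro p hp
    simp only [pvGroups, List.mem_cons] at hp
    rcases hp with hp | hp
    · subst hp; exact List.mem_cons_self
    · exact List.mem_cons_of_mem _ ((t.dropWhile_sublist (· == x)).mem (ih p hp))

theorem pv_lt_of_mem_dropWhile : ∀ (t : List String) (x z : String),
    (x :: t).Pairwise (· ≤ ·) → z ∈ t.dropWhile (· == x) → x < z := by
  intro t
  induction t with
  | nil => intro x z _ hz; simp at hz
  | cons y t ih =>
    intro x z h hz
    rcases List.pairwise_cons.mp h with ⟨hle, hyt⟩
    by_cases hyx : y = x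
    · subst hyx
      rw [List.dropWhile_cons_of_pos (by simp)] at hz
      exact ih y z hyt hz
    · rw [List.dropWhile_cons_of_neg (by simp [hyx])] at hz
      have hxy : x < y := lt_of_le_of_ne (hle y List.mem_cons_self) (Ne.symm hyx)
      rcases List.mem_cons.mp hz with rfl | hz
      · exact hxy
      · exact lt_of_lt_of_le hxy ((List.pairwise_cons.mp hyt).1 z hz)

theorem pv_dropWhile_pairwise (t : List String) (x : String)
    (h : (x :: t).Pairwise (· ≤ ·)) : (t.dropWhile (· == x)).Pairwise (· ≤ ·) :=
  List.Pairwise.sublist (t.dropWhile_sublist (· == x)) (List.pairwise_cons.mp h).2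

theorem pvGroups_pairwise : ∀ (m : List String), m.Pairwise (· ≤ ·) →
    (pvGroups m).Pairwise (fun a b => a.1 < b.1) := by
  intro m
  induction m using pvGroups.induct with
  | case1 => intro _; simp [pvGroups]
  | case2 x t ih =>
    intro h
    simp only [pvGroups]
    refine List.pairwise_cons.mpr ⟨?_, ih (pv_dropWhile_pairwise t x h)⟩
    intro p hp
    exact pv_lt_of_mem_dropWhile t x p.1 h (pvGroups_fst_mem _ p hp)

theorem pvGroups_perm : ∀ (m : List String), m.Pairwise (· ≤ ·) →
    (pvGroups m).Perm ((PySem.Set.ofList m).map (fun k => (k, (m.count k : Int)))) := by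
  intro m
  induction m using pvGroups.induct with
  | case1 => intro _; simp [pvGroups, PySem.Set.ofList]
  | case2 x t ih =>
    intro h
    have hdrop : ∀ z ∈ t.dropWhile (· == x), x < z := fun z hz => pv_lt_of_mem_dropWhile t x z h hz
    have hxnr : x ∉ t.dropWhile (· == x) := fun hx => absurd (hdrop x hx) (lt_irrefl x)
    have htake : ∀ z ∈ t.takeWhile (· == x), z = x := by
      intro z hz
      simpa using List.mem_takeWhile_imp hz
    have hmem : ∀ a, a ∈ PySem.Set.ofList (x :: t) ↔ a ∈ x :: PySem.Set.ofList (t.dropWhile (· == x)) := by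
      intro a
      simp only [PySem.Set.mem_ofList, List.mem_cons]
      constructor
      · rintro (rfl | ha)
        · exact Or.inl rfl
        · rw [← List.takeWhile_append_dropWhile (p := (· == x)) (l := t), List.mem_append] at ha
          rcases ha with ha | ha
          · exact Or.inl (htake a ha)
          · exact Or.inr (by simpa using ha)
      · rintro (rfl | ha)
        · exact Or.inl rfl
        · exact Or.inr ((t.dropWhile_sublist (· == x)).mem (by simpa using ha))
    have hsetperm : (PySem.Set.ofList (x :: t)).Perm (x :: PySem.Set.ofList (t.dropWhile (· == x))) := by
      refine (List.perm_ext_iff_of_nodup (PySem.Set.nodup_ofList _) ?_).mpr hmem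
      exact List.nodup_cons.mpr ⟨by simpa [PySem.Set.mem_ofList] using hxnr, PySem.Set.nodup_ofList _⟩
    -- counts of keys of the tail groups agree between (x :: t) and the dropped tail
    have hcount : ∀ k ∈ PySem.Set.ofList (t.dropWhile (· == x)),
        (k, ((t.dropWhile (· == x)).count k : Int)) = (k, ((x :: t).count k : Int)) := by
      intro k hk
      have hkgt : x < k := hdrop k (by simpa [PySem.Set.mem_ofList] using hk)
      have hkx : k ≠ x := fun he => absurd (he ▸ hkgt) (lt_irrefl x)
      have h1 : (x :: t).count k = t.count k := List.count_cons_of_ne (Ne.symm hkx)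
      have h2 : t.count k = (t.dropWhile (· == x)).count k := by
        conv_lhs => rw [← List.takeWhile_append_dropWhile (p := (· == x)) (l := t)]
        rw [List.count_append, List.count_eq_zero.mpr (fun hkw => hkx (htake k hkw)), Nat.zero_add]
      rw [h1, h2]
    have hhead : (x, 1 + (t.count x : Int)) = (x, ((x :: t).count x : Int)) := by
      rw [List.count_cons_self]; push_cast; ring_nf
    have htail := ih (pv_dropWhile_pairwise t x h)
    rw [List.map_congr_left hcount] at htail
    have step2 : ((x :: PySem.Set.ofList (t.dropWhile (· == x))).map
        (fun k => (k, ((x :: t).count k : Int)))).Perm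
        ((PySem.Set.ofList (x :: t)).map (fun k => (k, ((x :: t).count k : Int)))) :=
      (hsetperm.map _).symm
    simp only [pvGroups, hhead]
    exact (List.Perm.cons _ htail).trans step2

-- A's output loop is "Deck\n" followed by the concatenated lines
theorem pv_foldlA_eq_cat : ∀ (l : List (String × Int)) (a : String),
    l.foldl (fun s p => s ++ PySem.Int.toStr p.2 ++ " " ++ p.1 ++ "\n") a = a ++ pvCat l := by
  intro l
  induction l with
  | nil => intro a; simp [pvCat]
  | cons p t ih =>
    intro a
    rw [List.foldl_cons, ih, pvCat, pvLine]
    simp [String.append_assoc]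

-- B's run-length loop, written as the right-nested recursion it unfolds to
def pvRuns (cur : String) (cnt : Int) : List String → String
  | [] => pvLine cur cnt
  | name :: rest =>
    if name = cur then pvRuns cur (cnt + 1) rest
    else pvLine cur cnt ++ pvRuns name 1 rest

theorem pv_foldlB_eq_runs : ∀ (l : List String) (out cur : String) (cnt : Int),
    pvFinish (l.foldl (fun (s : String × String × Int) name =>
        if name = s.2.1 then (s.1, s.2.1, s.2.2 + 1)
        else (s.1 ++ pvLine s.2.1 s.2.2, name, 1)) (out, cur, cnt)) = out ++ pvRuns cur cnt l := by
  intro l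
  induction l with
  | nil => intro out cur cnt; simp [pvFinish, pvRuns]
  | cons name t ih =>
    intro out cur cnt
    by_cases hn : name = cur
    · subst hn
      rw [List.foldl_cons, if_pos rfl, ih, pvRuns, if_pos rfl]
    · rw [List.foldl_cons, if_neg hn, ih]
      conv_rhs => rw [pvRuns]
      rw [if_neg hn, ← String.append_assoc]

theorem pvRuns_eq_cat : ∀ (t : List String) (cur : String) (cnt : Int),
    (cur :: t).Pairwise (· ≤ ·) →
    pvRuns cur cnt t = pvLine cur (cnt + (t.count cur : Int)) ++ pvCat (pvGroups (t.dropWhile (· == cur))) := by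
  intro t
  induction t with
  | nil => intro cur cnt _; simp [pvRuns, pvCat, pvGroups]
  | cons name t ih =>
    intro cur cnt h
    rcases List.pairwise_cons.mp h with ⟨hle, hnt⟩
    by_cases hn : name = cur
    · subst hn
      have hsort : (name :: t).Pairwise (· ≤ ·) := by
        refine List.pairwise_cons.mpr ⟨fun z hz => hle z (List.mem_cons_of_mem _ hz), ?_⟩
        exact (List.pairwise_cons.mp hnt).2
      rw [pvRuns, if_pos rfl, ih name (cnt + 1) hsort,
        List.dropWhile_cons_of_pos (by simp), List.count_cons_self]
      congr 1
      push_cast; ring_nf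
    · have hcur0 : t.count cur = 0 := by
        rw [List.count_eq_zero]
        intro hcur
        have h1 : cur < name :=
          lt_of_le_of_ne (hle name List.mem_cons_self) (Ne.symm hn)
        have h2 : name ≤ cur := (List.pairwise_cons.mp hnt).1 cur hcur
        exact absurd (lt_of_lt_of_le h1 h2) (lt_irrefl cur)
      rw [pvRuns, if_neg hn, ih name 1 hnt,
        List.dropWhile_cons_of_neg (by simp [hn]),
        List.count_cons_of_ne hn, hcur0]
      rw [pvGroups, pvCat]
      simp

-- the counting loop of A is Counter(names)
theorem pvA_counter (scryfall_deck : List (List (String × String))) :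
    scryfall_deck.foldl (fun d scryfall_card =>
      let forge_card := pvCardName scryfall_card
      if d.contains forge_card then d.insert forge_card (d.getD forge_card 0 + 1)
      else d.insert forge_card 1) PySem.Dict.empty
    = PySem.Dict.counter (scryfall_deck.map pvCardName) := by
  rw [← PySem.Dict.foldl_insert_getD_add_one_eq_counter, List.foldl_map]
  apply PySem.List.foldl_congr_mem
  intro d card _
  by_cases hc : d.contains (pvCardName card) = true
  · simp [hc]
  · rw [if_neg (by simp [hc]),
      PySem.Dict.getD_of_not_contains d 0 (by simpa using hc), Int.zero_add]

theorem format_scryfall_deck_eq (scryfall_deck : List (List (String × String))) :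
    format_scryfall_deck scryfall_deck = format_scryfall_deck_alt scryfall_deck := by
  unfold format_scryfall_deck format_scryfall_deck_alt
  rw [pvA_counter]
  dsimp only
  have hSsorted := PySem.List.sorted_pairwise (scryfall_deck.map pvCardName) (fun x => x)
  have hSperm := PySem.List.sorted_perm (scryfall_deck.map pvCardName) (fun x => x) false
  have hitems : PySem.List.sorted (PySem.Dict.counter (scryfall_deck.map pvCardName)).items (fun x => x.1) false
      = pvGroups (PySem.List.sorted (scryfall_deck.map pvCardName) (fun x => x) false) := by
    apply PySem.List.sorted_eq_of_perm_of_pairwise_lt _ _ _ _ (pvGroups_pairwise _ hSsorted)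
    have h1 := pvGroups_perm _ hSsorted
    have h2 : ((PySem.Set.ofList (PySem.List.sorted (scryfall_deck.map pvCardName) (fun x => x) false)).map
          (fun k => (k, ((PySem.List.sorted (scryfall_deck.map pvCardName) (fun x => x) false).count k : Int)))).Perm
        ((PySem.Dict.counter (scryfall_deck.map pvCardName)).items) := by
      rw [PySem.Dict.items_counter]
      have hfun : (fun k : String => (k, ((PySem.List.sorted (scryfall_deck.map pvCardName) (fun x => x) false).count k : Int)))
          = (fun k : String => (k, ((scryfall_deck.map pvCardName).count k : Int))) := by
        funext k
        rw [hSperm.count_eq]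
      rw [hfun]
      refine List.Perm.map _ ?_
      refine (List.perm_ext_iff_of_nodup (PySem.Set.nodup_ofList _) (PySem.Set.nodup_ofList _)).mpr ?_
      intro a
      simp only [PySem.Set.mem_ofList]
      exact hSperm.mem_iff
    exact h1.trans h2
  rw [hitems, pv_foldlA_eq_cat]
  cases hSc : PySem.List.sorted (scryfall_deck.map pvCardName) (fun x => x) false with
  | nil => simp [pvGroups, pvCat]
  | cons c0 rest =>
    dsimp only
    rw [pv_foldlB_eq_runs rest "Deck\n" c0 1,
      pvRuns_eq_cat rest c0 1 (hSc ▸ hSsorted), pvGroups, pvCat]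

-- ===== VERDICT (by name: the statement is the Claim_ definition above) =====
theorem format_scryfall_deck_spec : Claim_equal_format_scryfall_deck := by
  intro scryfall_deck _ _
  unfold Spec_format_scryfall_deck
  exact format_scryfall_deck_eq scryfall_deck
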